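-- pv_equiv track=rewrite | github.com/Z-Es-0/codeforces | 黑历史/cf920-div3/C.py | can_send_all_messages
-- ===== SOURCE A (Python) =====
-- def can_send_all_messages(n, f, a, b, moments):
--     current_charge = f
--     last_moment = 0
--
--     for moment in moments:
--         stay_on_cost = a * (moment - last_moment)
--         if stay_on_cost < b:
--             current_charge -= stay_on_cost
--         else:
--             current_charge -= b
--         if current_charge <= 0:
--             return "NO"
--         last_moment = moment
--     return "YES"
-- ===== SOURCE B (Python) =====
-- def can_send_all_messages(n, f, a, b, moments):
--     # Divide and conquer: the answer is "NO" iff the maximum prefix drain of the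
--     # gap-cost list reaches f.  mp computes (segment sum, max nonempty-prefix sum)
--     # with the combine rule maxPrefix(L++R) = max(maxPrefix L, sum L + maxPrefix R).
--     if not moments:
--         return "YES"
--     costs = [min(a * (m - p), b) for p, m in zip([0] + moments, moments)]
--
--     def mp(lo, hi):
--         if hi - lo == 1:
--             c = costs[lo]
--             return c, c
--         mid = (lo + hi) // 2
--         sL, pL = mp(lo, mid)
--         sR, pR = mp(mid, hi)
--         return sL + sR, max(pL, sL + pR)
--
--     _, peak = mp(0, len(costs))
--     return "NO" if f <= peak else "YES"
-- ===== Notes on version B (the rewrite author's own statement) =====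
-- stated objective: alternative
-- what changed: Replaces A's sequential charge simulation with a divide-and-conquer computation of the maximum prefix drain of the gap-cost list (combine rule maxPrefix(L++R) = max(maxPrefix L, sum L + maxPrefix R)); a single comparison f <= peak then decides NO, with no running charge or early exit.
import Mathlib
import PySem

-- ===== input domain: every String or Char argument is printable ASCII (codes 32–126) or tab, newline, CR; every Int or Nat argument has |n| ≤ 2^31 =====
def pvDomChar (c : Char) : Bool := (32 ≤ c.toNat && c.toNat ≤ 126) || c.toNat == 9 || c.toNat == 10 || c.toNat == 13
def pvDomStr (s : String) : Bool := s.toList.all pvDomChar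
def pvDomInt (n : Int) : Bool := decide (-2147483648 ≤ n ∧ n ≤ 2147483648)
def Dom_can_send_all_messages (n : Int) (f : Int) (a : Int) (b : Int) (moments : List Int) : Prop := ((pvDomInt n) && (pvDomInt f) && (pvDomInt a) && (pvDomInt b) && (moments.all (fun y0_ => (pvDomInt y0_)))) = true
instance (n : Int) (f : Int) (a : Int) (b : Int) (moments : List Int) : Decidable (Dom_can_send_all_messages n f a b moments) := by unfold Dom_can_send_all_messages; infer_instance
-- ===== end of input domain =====

-- B replaces A's sequential charge simulation with a divide-and-conquer maximum-prefix-drain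
-- computation over the gap-cost list, then a single comparison f ≤ peak (alternative algorithm, same cost).


-- ===== PORT A =====
def canSendLoopA (a : Int) (b : Int) : Int → Int → List Int → String
  | _currentCharge, _lastMoment, [] => "YES"
  | currentCharge, lastMoment, moment :: rest =>
    let stayOnCost := a * (moment - lastMoment)
    let currentCharge' := if stayOnCost < b then currentCharge - stayOnCost else currentCharge - b
    if currentCharge' ≤ 0 then "NO"
    else canSendLoopA a b currentCharge' moment rest

def can_send_all_messages (_n : Int) (f : Int) (a : Int) (b : Int) (moments : List Int) : String :=
  canSendLoopA a b f 0 moments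

-- ===== PORT B =====
-- Source B's recursive mp(lo, hi) over the costs list, transliterated on the sublist costs[lo:hi]
-- (left half has ⌊len/2⌋ elements, exactly Python's mid = (lo+hi)//2); returns (segment sum, max nonempty-prefix sum).
def mpB : List Int → Int × Int
  | [] => (0, 0)        -- never reached (B guards the empty list)
  | [c] => (c, c)
  | c1 :: c2 :: rest =>
    let L := mpB ((c1 :: c2 :: rest).take ((c1 :: c2 :: rest).length / 2))
    let R := mpB ((c1 :: c2 :: rest).drop ((c1 :: c2 :: rest).length / 2))
    (L.1 + R.1, max L.2 (L.1 + R.2))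
termination_by cs => cs.length
decreasing_by
  · simp [List.length_take]; omega
  · simp; omega

def can_send_all_messages_alt (_n : Int) (f : Int) (a : Int) (b : Int) (moments : List Int) : String :=
  if moments = [] then "YES"
  else
    let costs := ((0 :: moments).zip moments).map (fun p => min (a * (p.2 - p.1)) b)
    let peak := (mpB costs).2
    if f ≤ peak then "NO" else "YES"

-- ===== PRECONDITION & SPEC =====
def Spec_can_send_all_messages (n : Int) (f : Int) (a : Int) (b : Int) (moments : List Int) (out : String) : Prop := out = can_send_all_messages_alt n f a b moments
instance (n : Int) (f : Int) (a : Int) (b : Int) (moments : List Int) (out : String) : Decidable (Spec_can_send_all_messages n f a b moments out) := by unfold Spec_can_send_all_messages; infer_instance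

-- ===== CLAIM (what is proved, stated in full; the proofs are below) =====
def Claim_equal_can_send_all_messages : Prop := ∀ (n : Int) (f : Int) (a : Int) (b : Int) (moments : List Int), Dom_can_send_all_messages n f a b moments → Spec_can_send_all_messages n f a b moments (can_send_all_messages n f a b moments)

-- ===== LEMMAS AND PROOFS =====

-- the gap-cost list as A builds it implicitly (last_moment threading), and the max nonempty-prefix sum
def costsF (a b l : Int) : List Int → List Int
  | [] => []
  | m :: rest => min (a * (m - l)) b :: costsF a b m rest

def mprefix : List Int → Int
  | [] => 0             -- unused
  | [c] => c
  | c :: rest => max c (c + mprefix rest)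

lemma mprefix_cons (c : Int) (rest : List Int) (h : rest ≠ []) :
    mprefix (c :: rest) = max c (c + mprefix rest) := by
  cases rest with
  | nil => exact absurd rfl h
  | cons r rs => rfl

lemma mprefix_append (L R : List Int) (hL : L ≠ []) (hR : R ≠ []) :
    mprefix (L ++ R) = max (mprefix L) (L.sum + mprefix R) := by
  induction L with
  | nil => exact absurd rfl hL
  | cons c rest ih =>
    cases rest with
    | nil =>
      have : (([c] : List Int) ++ R) = c :: R := rfl
      rw [this, mprefix_cons c R hR]
      simp [mprefix]
    | cons r rs =>
      have hrest : (r :: rs : List Int) ≠ [] := by simp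
      have h1 : ((c :: r :: rs) ++ R) = c :: ((r :: rs) ++ R) := rfl
      rw [h1, mprefix_cons c ((r :: rs) ++ R) (by simp),
          ih hrest, mprefix_cons c (r :: rs) hrest]
      simp only [List.sum_cons]
      omega

lemma mpB_spec : ∀ (cs : List Int), cs ≠ [] → mpB cs = (cs.sum, mprefix cs) := by
  intro cs
  fun_induction mpB cs with
  | case1 => intro h; exact absurd rfl h
  | case2 c => intro _; simp [mprefix]
  | case3 c1 c2 rest L R ihL ihR =>
    intro _
    have hLdef : L = mpB (List.take ((c1 :: c2 :: rest).length / 2) (c1 :: c2 :: rest)) := rfl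
    have hRdef : R = mpB (List.drop ((c1 :: c2 :: rest).length / 2) (c1 :: c2 :: rest)) := rfl
    rw [hLdef, hRdef]
    set cs := c1 :: c2 :: rest with hcs
    have hlen : 2 ≤ cs.length := by simp [hcs]
    have hk1 : 1 ≤ cs.length / 2 := by omega
    have hk2 : cs.length / 2 < cs.length := by omega
    have hTne : cs.take (cs.length / 2) ≠ [] := by
      intro h
      have := congrArg List.length h
      simp [List.length_take] at this
      omega
    have hDne : cs.drop (cs.length / 2) ≠ [] := by
      intro h
      have := congrArg List.length h
      simp at this
      omega
    have hL' := ihL hTne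
    have hR' := ihR hDne
    rw [hL', hR']
    have happ : cs.take (cs.length / 2) ++ cs.drop (cs.length / 2) = cs := List.take_append_drop _ _
    have hsum : (cs.take (cs.length / 2)).sum + (cs.drop (cs.length / 2)).sum = cs.sum := by
      conv_rhs => rw [← happ]
      simp
    have hpre : mprefix cs =
        max (mprefix (cs.take (cs.length / 2)))
            ((cs.take (cs.length / 2)).sum + mprefix (cs.drop (cs.length / 2))) := by
      conv_lhs => rw [← happ]
      exact mprefix_append _ _ hTne hDne
    simp only [hpre, hsum]

-- the cost list A threads step by step equals the zip-built list B starts from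
lemma costsF_eq_zipmap (a b : Int) : ∀ (ms : List Int) (l : Int),
    costsF a b l ms = ((l :: ms).zip ms).map (fun p => min (a * (p.2 - p.1)) b) := by
  intro ms
  induction ms with
  | nil => intro l; rfl
  | cons m rest ih =>
    intro l
    simp only [costsF, List.zip_cons_cons, List.map_cons, ih m]

-- A's single step, with the branch pair rewritten as one min-subtraction
lemma loop_step (a b c l m : Int) (rest : List Int) :
    canSendLoopA a b c l (m :: rest) =
      if c - min (a * (m - l)) b ≤ 0 then "NO"
      else canSendLoopA a b (c - min (a * (m - l)) b) m rest := by
  have hcost : (if a * (m - l) < b then c - a * (m - l) else c - b)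
      = c - min (a * (m - l)) b := by
    by_cases h : a * (m - l) < b
    · rw [if_pos h]; omega
    · rw [if_neg h]; omega
  show (if (if a * (m - l) < b then c - a * (m - l) else c - b) ≤ 0 then "NO"
        else canSendLoopA a b (if a * (m - l) < b then c - a * (m - l) else c - b) m rest) = _
  rw [hcost]

-- A's loop answers "NO" exactly when the charge c is at most the maximum prefix drain
lemma loop_char (a b : Int) : ∀ (ms : List Int) (c l : Int),
    canSendLoopA a b c l ms =
      if ms = [] then "YES"
      else if c ≤ mprefix (costsF a b l ms) then "NO" else "YES" := by
  intro ms
  induction ms with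
  | nil => intro c l; simp [canSendLoopA]
  | cons m rest ih =>
    intro c l
    rw [loop_step, if_neg (by simp : ¬ (m :: rest : List Int) = []),
        show costsF a b l (m :: rest) = min (a * (m - l)) b :: costsF a b m rest from rfl]
    cases rest with
    | nil =>
      rw [show canSendLoopA a b (c - min (a * (m - l)) b) m [] = "YES" from rfl,
          show costsF a b m [] = [] from rfl,
          show mprefix [min (a * (m - l)) b] = min (a * (m - l)) b from rfl]
      split_ifs with h1 h2 <;> first | rfl | omega
    | cons r rs =>
      rw [ih, if_neg (by simp : ¬ (r :: rs : List Int) = []),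
          mprefix_cons _ _ (by simp [costsF] : costsF a b m (r :: rs) ≠ [])]
      split_ifs with h1 h2 h3 <;> first | rfl | (exfalso; omega)

-- ===== VERDICT (by name: the statement is the Claim_ definition above) =====
theorem can_send_all_messages_spec : Claim_equal_can_send_all_messages := by
  intro n f a b ms _
  unfold Spec_can_send_all_messages can_send_all_messages can_send_all_messages_alt
  cases ms with
  | nil => simp [canSendLoopA]
  | cons m rest =>
    rw [loop_char]
    have hne : ((0 :: m :: rest).zip (m :: rest)).map
        (fun p => min (a * (p.2 - p.1)) b) ≠ [] := by simp
    rw [if_neg (by simp : (m :: rest : List Int) ≠ [])]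
    simp only [if_neg (by simp : ¬ (m :: rest : List Int) = [])]
    rw [mpB_spec _ hne]
    rw [costsF_eq_zipmap a b (m :: rest) 0]
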